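-- pv_equiv track=rewrite | github.com/ALIYILD/DeepSynaps-Protocol-Studio | apps/api/app/services/protocol_personalization.py | _dedupe_sorted
-- ===== SOURCE A (Python) =====
-- def _dedupe_sorted(items: list[str]) -> list[str]:
--     seen: set[str] = set()
--     out: list[str] = []
--     for x in sorted(items):
--         if x not in seen:
--             seen.add(x)
--             out.append(x)
--     return out
-- ===== SOURCE B (Python) =====
-- def _dedupe_sorted(items: list[str]) -> list[str]:
--     return sorted(set(items))
-- ===== Notes on version B (the rewrite author's own statement) =====
-- stated objective: idiomatic
-- what changed: Instead of sorting everything and then scanning with a 'seen' set, B first collapses the list into a set (hashing, one O(n) pass) and sorts only the k distinct elements -- the standard-library one-liner sorted(set(items)); no per-element membership test during output construction.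
import Mathlib
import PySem

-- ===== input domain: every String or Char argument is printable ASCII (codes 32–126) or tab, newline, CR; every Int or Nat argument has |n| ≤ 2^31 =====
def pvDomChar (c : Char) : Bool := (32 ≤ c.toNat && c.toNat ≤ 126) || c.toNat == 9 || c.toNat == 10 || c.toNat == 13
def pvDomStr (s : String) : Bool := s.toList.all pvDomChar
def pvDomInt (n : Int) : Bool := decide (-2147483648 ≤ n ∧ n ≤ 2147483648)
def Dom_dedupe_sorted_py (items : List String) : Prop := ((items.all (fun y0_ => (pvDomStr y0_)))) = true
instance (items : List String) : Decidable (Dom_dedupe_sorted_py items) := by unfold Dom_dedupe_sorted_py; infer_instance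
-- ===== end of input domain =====

-- B replaces sort-then-scan-with-seen-set by the idiomatic sorted(set(items)):
-- dedupe first with a set, then sort only the distinct elements (return value proved equal on all inputs).

-- ===== PORT A =====
def dedupe_sorted_py (items : List String) : List String :=
  (PySem.List.sorted items (fun x => x) false).foldl
    (fun (st : PySem.Set String × List String) x =>
      if st.1.contains x then st
      else (st.1.add x, st.2 ++ [x]))
    (PySem.Set.empty, []) |>.2

-- ===== PORT B =====
def dedupe_sorted_py_alt (items : List String) : List String :=
  PySem.List.sorted (PySem.Set.ofList items) (fun x => x) false

-- ===== PRECONDITION & SPEC =====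
def Spec_dedupe_sorted_py (items : List String) (out : List String) : Prop := out = dedupe_sorted_py_alt items
instance (items : List String) (out : List String) : Decidable (Spec_dedupe_sorted_py items out) := by unfold Spec_dedupe_sorted_py; infer_instance

-- ===== CLAIM (what is proved, stated in full; the proofs are below) =====
def Claim_equal_dedupe_sorted_py : Prop := ∀ (items : List String), Dom_dedupe_sorted_py items → Spec_dedupe_sorted_py items (dedupe_sorted_py items)

-- ===== LEMMAS AND PROOFS =====

-- A's fold keeps seen = out (both start empty and are extended together), and each step is
-- exactly PySem.Set.add on both components; so A's output is Set.ofList of the sorted list.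
theorem foldA_eq_ofList (l : List String) (s : PySem.Set String) :
    (l.foldl (fun (st : PySem.Set String × List String) x =>
        if st.1.contains x then st else (st.1.add x, st.2 ++ [x])) (s, (s : List String))).2
    = l.foldl PySem.Set.add s := by
  induction l generalizing s with
  | nil => rfl
  | cons x t ih =>
    simp only [List.foldl_cons]
    by_cases h : s.contains x
    · rw [if_pos h]
      have hx : x ∈ s := (PySem.Set.contains_iff s x).mp h
      have : PySem.Set.add s x = s := by simp [PySem.Set.add, hx]
      rw [this]; exact ih s
    · rw [if_neg h]
      have hx : x ∉ s := fun hm => h ((PySem.Set.contains_iff s x).mpr hm)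
      have : PySem.Set.add s x = s ++ [x] := by simp [PySem.Set.add, hx]
      rw [this]; exact ih (s ++ [x])

-- Set.ofList of a list is a sublist of it (first occurrences, in order).
theorem ofList_sublist (xs : List String) : List.Sublist (PySem.Set.ofList xs : List String) xs := by
  induction xs using List.reverseRecOn with
  | nil => simp [PySem.Set.ofList]
  | append_singleton t x ih =>
    rw [PySem.Set.ofList_append_singleton]
    by_cases h : (PySem.Set.ofList t).contains x
    · have hx : x ∈ PySem.Set.ofList t := (PySem.Set.contains_iff _ x).mp h
      have : (PySem.Set.ofList t).add x = PySem.Set.ofList t := by simp [PySem.Set.add, hx]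
      rw [this]; exact ih.trans (List.sublist_append_left t [x])
    · have hx : x ∉ PySem.Set.ofList t := fun hm => h ((PySem.Set.contains_iff _ x).mpr hm)
      have : (PySem.Set.ofList t).add x = PySem.Set.ofList t ++ [x] := by simp [PySem.Set.add, hx]
      rw [this]; exact ih.append (List.Sublist.refl [x])

-- Set.ofList of a ≤-sorted list is strictly increasing (sublist keeps ≤; nodup upgrades to <).
theorem ofList_sorted_pairwise_lt (items : List String) :
    (PySem.Set.ofList (PySem.List.sorted items (fun x => x) false) : List String).Pairwise (· < ·) := by
  have hle : (PySem.Set.ofList (PySem.List.sorted items (fun x => x) false) : List String).Pairwise (· ≤ ·) :=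
    (PySem.List.sorted_pairwise items (fun x => x)).sublist (ofList_sublist _)
  have hne : (PySem.Set.ofList (PySem.List.sorted items (fun x => x) false) : List String).Pairwise (· ≠ ·) :=
    PySem.Set.nodup_ofList _
  exact (hle.and hne).imp (fun h => lt_of_le_of_ne h.1 h.2)

-- ===== VERDICT (by name: the statement is the Claim_ definition above) =====
theorem dedupe_sorted_py_spec : Claim_equal_dedupe_sorted_py := by
  intro items _
  unfold Spec_dedupe_sorted_py dedupe_sorted_py dedupe_sorted_py_alt
  have hA : ((PySem.List.sorted items (fun x => x) false).foldl
      (fun (st : PySem.Set String × List String) x =>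
        if st.1.contains x then st else (st.1.add x, st.2 ++ [x]))
      (PySem.Set.empty, [])).2
      = PySem.Set.ofList (PySem.List.sorted items (fun x => x) false) := by
    rw [PySem.Set.ofList_eq_foldl]
    exact foldA_eq_ofList _ PySem.Set.empty
  rw [hA]
  refine (PySem.List.sorted_eq_of_perm_of_pairwise_lt _ _ _ ?_ (ofList_sorted_pairwise_lt items)).symm
  rw [List.perm_ext_iff_of_nodup (PySem.Set.nodup_ofList _) (PySem.Set.nodup_ofList _)]
  intro a
  simp [PySem.Set.mem_ofList, PySem.List.mem_sorted]
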